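-- pv_equiv track=rewrite | github.com/AnnaGlid/experiments | algorythms/Rule.py | choose_shortest_rules
-- ===== SOURCE A (Python) =====
-- def __rule_length(rule):
--     # return the number of attributes in a rule
--     # minus one because of the decision
--     return rule.count('=') - 1
--
-- def choose_shortest_rules(rules_list):
--     min_length = 100
--     result = []
--     for rule in rules_list:
--         if __rule_length(rule) < min_length:
--             result.clear()
--             min_length = __rule_length(rule)
--         if __rule_length(rule) == min_length:
--             result.append(rule)
--     return result, min_length
-- ===== SOURCE B (Python) =====
-- def __rule_length(rule):
--     return rule.count('=') - 1
--
-- def choose_shortest_rules(rules_list):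
--     min_length = min([100] + [__rule_length(r) for r in rules_list])
--     result = [r for r in rules_list if __rule_length(r) == min_length]
--     return result, min_length
-- ===== Notes on version B (the rewrite author's own statement) =====
-- stated objective: simpler
-- what changed: Replaces the single streaming pass with in-loop clear()/reset of the accumulator by two plain passes: first compute the minimum rule length (seeded with 100, matching A's initial bound), then filter the rules equal to it.
import Mathlib
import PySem

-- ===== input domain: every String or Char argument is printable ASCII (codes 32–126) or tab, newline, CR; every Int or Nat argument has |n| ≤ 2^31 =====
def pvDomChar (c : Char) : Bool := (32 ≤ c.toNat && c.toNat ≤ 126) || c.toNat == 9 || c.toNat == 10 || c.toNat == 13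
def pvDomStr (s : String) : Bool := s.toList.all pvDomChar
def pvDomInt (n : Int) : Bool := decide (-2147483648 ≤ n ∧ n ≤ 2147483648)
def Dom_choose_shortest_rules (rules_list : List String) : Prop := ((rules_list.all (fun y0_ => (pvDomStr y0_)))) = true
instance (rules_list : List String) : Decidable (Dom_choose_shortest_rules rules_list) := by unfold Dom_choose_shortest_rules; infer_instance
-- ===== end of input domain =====

-- ===== PORT A =====
-- One honest line: B computes the minimum rule length in a first pass and filters in a
-- second, replacing A's single streaming pass with clear()/reset (objective: simpler).

-- rule.count('=') - 1
def pvRuleLen (rule : String) : Int := (PySem.Str.count rule "=" : Int) - 1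

def choose_shortest_rules (rules_list : List String) : List String × Int :=
  let st := rules_list.foldl (fun (st : List String × Int) rule =>
    let st := if pvRuleLen rule < st.2 then (([] : List String), pvRuleLen rule) else st
    if pvRuleLen rule = st.2 then (st.1 ++ [rule], st.2) else st) (([] : List String), (100 : Int))
  (st.1, st.2)

-- ===== PORT B =====
def choose_shortest_rules_alt (rules_list : List String) : List String × Int :=
  let min_length := (rules_list.map pvRuleLen).foldl min (100 : Int)
  (rules_list.filter (fun r => pvRuleLen r = min_length), min_length)

-- ===== PRECONDITION & SPEC =====
def Spec_choose_shortest_rules (rules_list : List String) (out : List String × Int) : Prop := out = choose_shortest_rules_alt rules_list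
instance (rules_list : List String) (out : List String × Int) : Decidable (Spec_choose_shortest_rules rules_list out) := by unfold Spec_choose_shortest_rules; infer_instance

-- ===== CLAIM (what is proved, stated in full; the proofs are below) =====
def Claim_equal_choose_shortest_rules : Prop := ∀ (rules_list : List String), Dom_choose_shortest_rules rules_list → Spec_choose_shortest_rules rules_list (choose_shortest_rules rules_list)

-- ===== LEMMAS AND PROOFS =====

theorem pvFoldlMinLe (l : List Int) (m : Int) : l.foldl min m ≤ m := by
  induction l generalizing m with
  | nil => simp
  | cons a t ih => exact le_trans (ih (min m a)) (min_le_left m a)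

-- A's loop, started from any state (res, m) with res the matches so far, lands on the
-- overall minimum and the suffix's matching rules appended (res kept iff m survives).
theorem pvLoop (l : List String) (res : List String) (m : Int) :
    l.foldl (fun (st : List String × Int) rule =>
      let st := if pvRuleLen rule < st.2 then (([] : List String), pvRuleLen rule) else st
      if pvRuleLen rule = st.2 then (st.1 ++ [rule], st.2) else st) (res, m)
    = ((if (l.map pvRuleLen).foldl min m = m then res else [])
        ++ l.filter (fun r => pvRuleLen r = (l.map pvRuleLen).foldl min m),
       (l.map pvRuleLen).foldl min m) := by
  induction l generalizing res m with
  | nil => simp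
  | cons r t ih =>
    simp only [List.foldl_cons, List.map_cons, List.filter_cons]
    by_cases h1 : pvRuleLen r < m
    · have hmin : min m (pvRuleLen r) = pvRuleLen r := by omega
      simp only [if_pos h1, hmin]
      rw [ih]
      have hle : (t.map pvRuleLen).foldl min (pvRuleLen r) ≤ pvRuleLen r :=
        pvFoldlMinLe _ _
      by_cases h2 : (t.map pvRuleLen).foldl min (pvRuleLen r) = pvRuleLen r
      · simp [h2, show pvRuleLen r ≠ m by omega]
      · have hne : ¬ ((t.map pvRuleLen).foldl min (pvRuleLen r) = m) := by
          have := hle; omega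
        simp [h2, hne, show ¬ (pvRuleLen r = (t.map pvRuleLen).foldl min (pvRuleLen r)) from fun h => h2 h.symm]
    · have hmin : min m (pvRuleLen r) = m := by omega
      simp only [if_neg h1, hmin]
      by_cases h2 : pvRuleLen r = m
      · simp only [if_pos h2]
        rw [ih]
        have hle : (t.map pvRuleLen).foldl min m ≤ m := pvFoldlMinLe _ _
        by_cases h3 : (t.map pvRuleLen).foldl min m = m
        · simp [h3, h2]
        · simp [h3, show ¬ (pvRuleLen r = (t.map pvRuleLen).foldl min m) by omega]
      · simp only [if_neg h2]
        rw [ih]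
        have hle : (t.map pvRuleLen).foldl min m ≤ m := pvFoldlMinLe _ _
        by_cases h3 : (t.map pvRuleLen).foldl min m = m
        · simp [h3, h2]
        · simp [h3, show ¬ (pvRuleLen r = (t.map pvRuleLen).foldl min m) by omega]

-- ===== VERDICT (by name: the statement is the Claim_ definition above) =====
theorem choose_shortest_rules_spec : Claim_equal_choose_shortest_rules := by
  intro rules_list _
  unfold Spec_choose_shortest_rules choose_shortest_rules choose_shortest_rules_alt
  rw [pvLoop]
  simp
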